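-- pv_equiv track=rewrite | github.com/fazlur/HyperionDev-SE_Bootcamp | T24/my_function.py | replace_second_word
-- ===== SOURCE A (Python) =====
-- def replace_second_word(sentence, sub = "Hello"):
--     modified_sentence = ""
--     count = 0
--     for word in sentence.split():
--         count += 1
--         if (count % 2 != 0):
--             modified_sentence += word + " "
--         else:
--             modified_sentence += sub + " "
--     return modified_sentence.strip()
-- ===== SOURCE B (Python) =====
-- def replace_second_word(sentence, sub="Hello"):
--     words = sentence.split()
--     words[1::2] = [sub] * len(words[1::2])
--     return " ".join(words).strip()
-- ===== Notes on version B (the rewrite author's own statement) =====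
-- stated objective: simpler
-- what changed: B materializes the word list, overwrites every second word with one strided slice assignment and joins with spaces (with the same final strip), eliminating A's running counter, parity branch and character-by-character string accumulation.
import Mathlib
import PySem

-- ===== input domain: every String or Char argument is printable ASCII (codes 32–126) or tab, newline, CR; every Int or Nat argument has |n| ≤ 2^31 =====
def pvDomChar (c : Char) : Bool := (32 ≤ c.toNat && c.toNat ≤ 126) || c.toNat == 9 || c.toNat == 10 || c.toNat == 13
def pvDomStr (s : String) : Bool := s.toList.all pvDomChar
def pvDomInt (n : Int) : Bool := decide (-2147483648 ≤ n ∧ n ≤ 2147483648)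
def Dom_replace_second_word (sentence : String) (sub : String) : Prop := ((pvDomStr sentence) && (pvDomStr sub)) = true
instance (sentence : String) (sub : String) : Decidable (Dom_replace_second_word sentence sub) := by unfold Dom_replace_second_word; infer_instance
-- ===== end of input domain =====

-- B replaces A's counter/parity/accumulate loop by: split into a word list, overwrite every
-- second word wholesale, join with spaces, strip (objective: simpler). Same return value.

-- ===== PORT A =====
-- loop body of A: count += 1; parity branch appends word or sub plus a space
def pvStepA (sub : List Char) (a : List Char × Int) (word : List Char) : List Char × Int :=
  let count := a.2 + 1
  if count % 2 ≠ 0 then (a.1 ++ word ++ [' '], count)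
  else (a.1 ++ sub ++ [' '], count)

def replace_second_word (sentence : String) (sub : String) : String :=
  let ms := (PySem.Chars.split₀ sentence.toList).foldl (pvStepA sub.toList) ([], 0)
  String.ofList (PySem.Chars.strip ms.1)

-- ===== PORT B =====
def replace_second_word_alt (sentence : String) (sub : String) : String :=
  let words := PySem.Chars.split₀ sentence.toList
  -- words[1::2] = [sub] * len(words[1::2]) : overwrite every odd index
  let words' := (PySem.List.enumerate words 0).map (fun p => if p.1 % 2 == 1 then sub.toList else p.2)
  String.ofList (PySem.Chars.strip (PySem.Chars.join [' '] words'))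

-- ===== PRECONDITION & SPEC =====
def Spec_replace_second_word (sentence : String) (sub : String) (out : String) : Prop := out = replace_second_word_alt sentence sub
instance (sentence : String) (sub : String) (out : String) : Decidable (Spec_replace_second_word sentence sub out) := by unfold Spec_replace_second_word; infer_instance

-- ===== CLAIM (what is proved, stated in full; the proofs are below) =====
def Claim_equal_replace_second_word : Prop := ∀ (sentence : String) (sub : String), Dom_replace_second_word sentence sub → Spec_replace_second_word sentence sub (replace_second_word sentence sub)

-- ===== LEMMAS AND PROOFS =====

-- every word produced by split() is nonempty and whitespace-free
lemma split0_go_good (s : List Char) : ∀ (cur : List Char) (acc : List (List Char)),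
    (∀ w ∈ acc, w ≠ [] ∧ ∀ c ∈ w, PySem.Chars.isspace c = false) →
    (∀ c ∈ cur, PySem.Chars.isspace c = false) →
    ∀ w ∈ PySem.Chars.split₀.go s cur acc, w ≠ [] ∧ ∀ c ∈ w, PySem.Chars.isspace c = false := by
  induction s with
  | nil =>
    intro cur acc hacc hcur w hw
    by_cases hc : cur = []
    · simp [PySem.Chars.split₀.go, hc] at hw
      exact hacc w (by simpa using hw)
    · simp [PySem.Chars.split₀.go, List.isEmpty_iff, hc] at hw
      rcases hw with hw | hw
      · exact hacc w hw
      · subst hw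
        refine ⟨by simpa using hc, ?_⟩
        intro c hcmem; exact hcur c (by simpa using hcmem)
  | cons c rest ih =>
    intro cur acc hacc hcur w hw
    by_cases hs : PySem.Chars.isspace c = true
    · by_cases hc : cur = []
      · rw [PySem.Chars.split₀.go] at hw
        simp [hs, hc] at hw
        exact ih [] acc hacc (by simp) w hw
      · rw [PySem.Chars.split₀.go] at hw
        simp [hs, List.isEmpty_iff, hc] at hw
        refine ih [] (cur.reverse :: acc) ?_ (by simp) w hw
        intro v hv
        rcases List.mem_cons.mp hv with hv | hv
        · subst hv
          exact ⟨by simpa using hc, fun d hd => hcur d (by simpa using hd)⟩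
        · exact hacc v hv
    · rw [PySem.Chars.split₀.go] at hw
      simp [hs] at hw
      refine ih (c :: cur) acc hacc ?_ w hw
      intro d hd
      rcases List.mem_cons.mp hd with hd | hd
      · subst hd; simpa using hs
      · exact hcur d hd

lemma split0_good (s : List Char) : ∀ w ∈ PySem.Chars.split₀ s,
    w ≠ [] ∧ ∀ c ∈ w, PySem.Chars.isspace c = false := by
  intro w hw
  exact split0_go_good s [] [] (by simp) (by simp) w hw

-- A's fold, characterised against the enumerated word list
lemma foldA_eq (sub : List Char) (ws : List (List Char)) : ∀ (acc : List Char) (n : Int), 0 ≤ n →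
    (ws.foldl (pvStepA sub) (acc, n)).1
      = acc ++ ((PySem.List.enumerate ws n).map
          (fun p => (if p.1 % 2 == 1 then sub else p.2) ++ [' '])).flatten := by
  induction ws with
  | nil => intro acc n _; simp [PySem.List.enumerate_nil]
  | cons w t ih =>
    intro acc n hn
    rw [List.foldl_cons, PySem.List.enumerate_cons]
    by_cases hp : n % 2 = 1
    · have h1 : ¬ ((n + 1) % 2 ≠ 0) := by omega
      simp only [pvStepA, if_neg h1]
      rw [ih _ (n + 1) (by omega)]
      simp [hp, List.append_assoc]
    · have h1 : (n + 1) % 2 ≠ 0 := by omega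
      simp only [pvStepA, if_pos h1]
      rw [ih _ (n + 1) (by omega)]
      simp [hp, List.append_assoc]

lemma flatten_sep (l : List (List Char)) (h : l ≠ []) :
    (l.map (· ++ [' '])).flatten = PySem.Chars.join [' '] l ++ [' '] := by
  induction l with
  | nil => exact absurd rfl h
  | cons x t ih =>
    cases t with
    | nil => simp [PySem.Chars.join_singleton]
    | cons y u =>
      have h2 := ih (by simp)
      rw [PySem.Chars.join_cons_cons, List.map_cons, List.flatten_cons, h2]
      simp [List.append_assoc]

lemma lstrip_good_head (w X : List Char) (hw : w ≠ [])
    (hns : ∀ c ∈ w, PySem.Chars.isspace c = false) :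
    PySem.Chars.lstrip (w ++ X) = w ++ X := by
  cases w with
  | nil => exact absurd rfl hw
  | cons c t =>
    simp [PySem.Chars.lstrip, hns c (by simp)]

lemma rstrip_append_space (X : List Char) :
    PySem.Chars.rstrip (X ++ [' ']) = PySem.Chars.rstrip X := by
  simp [PySem.Chars.rstrip, (by decide : PySem.Chars.isspace ' ' = true)]

-- the joined substituted list starts with the first real word
lemma join_head (w : List Char) (t : List (List Char)) :
    ∃ Z, PySem.Chars.join [' '] (w :: t) = w ++ Z := by
  cases t with
  | nil => exact ⟨[], by simp [PySem.Chars.join_singleton]⟩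
  | cons z u =>
    exact ⟨[' '] ++ PySem.Chars.join [' '] (z :: u), by
      rw [PySem.Chars.join_cons_cons]; simp [List.append_assoc]⟩

-- ===== VERDICT (by name: the statement is the Claim_ definition above) =====
theorem replace_second_word_spec : Claim_equal_replace_second_word := by
  intro sentence sub _
  unfold Spec_replace_second_word replace_second_word replace_second_word_alt
  simp only []
  rw [foldA_eq sub.toList _ [] 0 le_rfl, List.nil_append]
  have hmap : ((PySem.List.enumerate (PySem.Chars.split₀ sentence.toList) 0).map
      (fun p => (if p.1 % 2 == 1 then sub.toList else p.2) ++ [' ']))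
    = (((PySem.List.enumerate (PySem.Chars.split₀ sentence.toList) 0).map
        (fun p => if p.1 % 2 == 1 then sub.toList else p.2)).map (· ++ [' '])) := by
    rw [List.map_map]; rfl
  rw [hmap]
  by_cases h : PySem.Chars.split₀ sentence.toList = []
  · rw [h]
    simp [PySem.List.enumerate_nil, PySem.Chars.join_nil, PySem.Chars.strip,
      PySem.Chars.lstrip, PySem.Chars.rstrip]
  · set ws := PySem.Chars.split₀ sentence.toList with hws
    set ws' := (PySem.List.enumerate ws 0).map (fun p => if p.1 % 2 == 1 then sub.toList else p.2) with hws'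
    have hne' : ws' ≠ [] := by
      intro hnil
      have := congrArg List.length hnil
      simp [hws', PySem.List.length_enumerate] at this
      exact h this
    rw [flatten_sep ws' hne']
    cases hcase : ws with
    | nil => exact absurd hcase h
    | cons w t =>
      have hgood := split0_good sentence.toList w (by rw [← hws, hcase]; simp)
      have hcons : ws' = w :: ((PySem.List.enumerate t 1).map (fun p => if p.1 % 2 == 1 then sub.toList else p.2)) := by
        rw [hws', hcase, PySem.List.enumerate_cons]; simp
      obtain ⟨Z, hZ⟩ := join_head w ((PySem.List.enumerate t 1).map (fun p => if p.1 % 2 == 1 then sub.toList else p.2))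
      rw [hcons, hZ]
      congr 1
      calc PySem.Chars.strip (w ++ Z ++ [' '])
          = PySem.Chars.rstrip (PySem.Chars.lstrip (w ++ (Z ++ [' ']))) := by
            rw [PySem.Chars.strip, List.append_assoc]
        _ = PySem.Chars.rstrip (w ++ Z ++ [' ']) := by
            rw [lstrip_good_head w (Z ++ [' ']) hgood.1 hgood.2, List.append_assoc]
        _ = PySem.Chars.rstrip (w ++ Z) := rstrip_append_space _
        _ = PySem.Chars.strip (w ++ Z) := by
            rw [PySem.Chars.strip, lstrip_good_head w Z hgood.1 hgood.2]
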